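-- pv_equiv track=rewrite | github.com/edmondchuc/RDF2HTML | toolkit.py | extract_property_name_from_uri
-- ===== SOURCE A (Python) =====
-- def extract_property_name_from_uri(s):
--     """
--     Extract the property name of a URI.
--
--     :param s: A URI.
--     :type s: str
--     :return: The property name, where each word is separated by whitespace and set to lowercase.
--     :rtype: str
--     """
--     property_name = str(s)  # cast to str
--     # split on '#' if it exists, then on '/' and grab the last token
--     property_name = property_name.split('#')[-1].split('/')[-1]
--
--     # split the property_name if it is in camelCase or PascalCase
--     full_name = []
--     previous = 0
--     for i, letter in enumerate(property_name):
--         if letter.isupper():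
--             full_name.append(property_name[previous:i].lower())
--             previous = i
--     full_name.append(property_name[previous:].lower())
--
--     property_name = ' '.join(full_name)
--     return property_name
-- ===== SOURCE B (Python) =====
-- def extract_property_name_from_uri(s):
--     """Extract the lowercase, space-separated property name of a URI (single pass)."""
--     token = str(s).split('#')[-1].split('/')[-1]
--     return ''.join(' ' + c if c.isupper() else c for c in token).lower()
-- ===== Notes on version B (the rewrite author's own statement) =====
-- stated objective: idiomatic
-- what changed: Replaces the index-tracking loop that collects slices between uppercase letters (plus a final join) with a single char-by-char pass that emits a space before each uppercase character and lowercases the assembled string once.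
import Mathlib
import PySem

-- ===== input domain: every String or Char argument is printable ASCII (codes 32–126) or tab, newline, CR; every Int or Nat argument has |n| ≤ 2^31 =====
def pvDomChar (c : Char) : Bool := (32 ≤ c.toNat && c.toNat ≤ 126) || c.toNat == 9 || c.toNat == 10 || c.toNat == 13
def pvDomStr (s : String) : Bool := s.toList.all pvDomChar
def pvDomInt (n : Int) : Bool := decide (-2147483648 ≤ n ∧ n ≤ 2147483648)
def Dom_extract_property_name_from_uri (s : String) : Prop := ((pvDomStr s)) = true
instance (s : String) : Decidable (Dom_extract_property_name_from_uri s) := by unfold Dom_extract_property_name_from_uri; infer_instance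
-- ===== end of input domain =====

-- B replaces A's index-tracking slice loop by a single char-by-char pass that emits a
-- space before each uppercase character and lowercases once at the end (idiomatic).

-- ===== PORT A =====
def extract_property_name_from_uri (s : String) : String :=
  -- property_name = str(s).split('#')[-1].split('/')[-1]
  let pn1 := (PySem.Chars.splitOn s.toList ['#']).getLastD []
  let token := (PySem.Chars.splitOn pn1 ['/']).getLastD []
  -- for i, letter in enumerate(property_name): if letter.isupper(): append slice; previous = i
  let st := (PySem.List.enumerate token).foldl
    (fun (st : List (List Char) × Int) (ic : Int × Char) =>
      if PySem.Chars.isupper ic.2 then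
        (st.1 ++ [PySem.Chars.lower (PySem.List.slice token (some st.2) (some ic.1))], ic.1)
      else st) ([], 0)
  -- full_name.append(property_name[previous:].lower()); ' '.join(full_name)
  let full_name := st.1 ++ [PySem.Chars.lower (PySem.List.slice token (some st.2) none)]
  String.ofList (PySem.Chars.join [' '] full_name)

-- ===== PORT B =====
def extract_property_name_from_uri_alt (s : String) : String :=
  -- token = str(s).split('#')[-1].split('/')[-1]
  let token := (PySem.Chars.splitOn ((PySem.Chars.splitOn s.toList ['#']).getLastD []) ['/']).getLastD []
  -- ''.join(' ' + c if c.isupper() else c for c in token).lower()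
  String.ofList (PySem.Chars.lower
    (token.flatMap (fun c => if PySem.Chars.isupper c then [' ', c] else [c])))

-- ===== PRECONDITION & SPEC =====
def Spec_extract_property_name_from_uri (s : String) (out : String) : Prop := out = extract_property_name_from_uri_alt s
instance (s : String) (out : String) : Decidable (Spec_extract_property_name_from_uri s out) := by unfold Spec_extract_property_name_from_uri; infer_instance

-- ===== CLAIM (what is proved, stated in full; the proofs are below) =====
def Claim_equal_extract_property_name_from_uri : Prop := ∀ (s : String), Dom_extract_property_name_from_uri s → Spec_extract_property_name_from_uri s (extract_property_name_from_uri s)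

-- ===== LEMMAS AND PROOFS =====

-- B's per-character emission
def pvEmit (c : Char) : List Char := if PySem.Chars.isupper c then [' ', c] else [c]

-- the (un-lowered) word pieces A's loop produces: current word w, remaining chars
def pvPieces (w : List Char) : List Char → List (List Char)
  | [] => [w]
  | c :: cs => if PySem.Chars.isupper c then w :: pvPieces [c] cs
               else pvPieces (w ++ [c]) cs

theorem pvPieces_ne_nil (tl : List Char) (w : List Char) : pvPieces w tl ≠ [] := by
  induction tl generalizing w with
  | nil => simp [pvPieces]
  | cons c cs ih => by_cases h : PySem.Chars.isupper c <;> simp [pvPieces, h, ih]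

-- A's fold, characterized by pvPieces
theorem pv_foldA (T : List Char) (tl : List Char) : ∀ (k prev : Nat) (acc : List (List Char)),
    T.drop k = tl → prev ≤ k →
    (let r := (PySem.List.enumerate tl (k : Int)).foldl
        (fun (st : List (List Char) × Int) (ic : Int × Char) =>
          if PySem.Chars.isupper ic.2 then
            (st.1 ++ [PySem.Chars.lower (PySem.List.slice T (some st.2) (some ic.1))], ic.1)
          else st) (acc, (prev : Int));
      r.1 ++ [PySem.Chars.lower (PySem.List.slice T (some r.2) none)])
    = acc ++ (pvPieces ((T.drop prev).take (k - prev)) tl).map PySem.Chars.lower := by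
  induction tl with
  | nil =>
    intro k prev acc hdrop hpk
    simp only [PySem.List.enumerate_nil, List.foldl_nil]
    rw [PySem.List.slice_from_natCast]
    have hlen : T.length ≤ k := by
      have := congrArg List.length hdrop; simp at this; omega
    simp only [pvPieces, List.map_cons, List.map_nil]
    rw [List.take_of_length_le (by simp; omega)]
  | cons c cs ih =>
    intro k prev acc hdrop hpk
    have hk : k < T.length := by
      rcases Nat.lt_or_ge k T.length with h | h
      · exact h
      · rw [List.drop_eq_nil_of_le h] at hdrop; simp at hdrop
    have hcs : T.drop (k + 1) = cs := by
      have h1 := congrArg (List.drop 1) hdrop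
      rw [List.drop_drop] at h1
      simpa [Nat.add_comm] using h1
    have hTk : T[k]? = some c := by
      have h0 : (T.drop k)[0]? = some c := by rw [hdrop]; rfl
      simpa [List.getElem?_drop] using h0
    have hcast : ((k + 1 : Nat) : Int) = (k : Int) + 1 := by push_cast; ring
    rw [PySem.List.enumerate_cons, List.foldl_cons]
    by_cases hc : PySem.Chars.isupper c
    · simp only [hc, if_pos]
      have ih' := ih (k + 1) k
        (acc ++ [PySem.Chars.lower (PySem.List.slice T (some (prev : Int)) (some (k : Int)))])
        hcs (Nat.le_succ k)
      rw [hcast] at ih'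
      simp only at ih' ⊢
      rw [ih']
      rw [PySem.List.slice_natCast]
      have htake1 : (T.drop k).take (k + 1 - k) = [c] := by
        rw [show k + 1 - k = 1 from by omega, hdrop]; rfl
      rw [htake1]
      simp [pvPieces, hc]
    · simp only [hc, if_neg, Bool.false_eq_true, not_false_eq_true]
      have ih' := ih (k + 1) prev acc hcs (Nat.le_succ_of_le hpk)
      rw [hcast] at ih'
      simp only at ih' ⊢
      rw [ih']
      have hgetd : (T.drop prev)[k - prev]? = some c := by
        rw [List.getElem?_drop, show prev + (k - prev) = k from by omega]
        exact hTk
      have htake : (T.drop prev).take (k + 1 - prev) = (T.drop prev).take (k - prev) ++ [c] := by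
        rw [show k + 1 - prev = (k - prev) + 1 from by omega, List.take_add_one, hgetd]
        rfl
      rw [htake]
      simp [pvPieces, hc]

-- joining the lowered pieces = lowering B's emitted stream
theorem pv_join_pieces (tl : List Char) : ∀ (w : List Char),
    PySem.Chars.join [' '] ((pvPieces w tl).map PySem.Chars.lower)
    = PySem.Chars.lower w ++ PySem.Chars.lower (tl.flatMap pvEmit) := by
  induction tl with
  | nil => intro w; simp [pvPieces, PySem.Chars.join_singleton, PySem.Chars.lower]
  | cons c cs ih =>
    intro w
    by_cases hc : PySem.Chars.isupper c
    · obtain ⟨q, qs, hq⟩ := List.exists_cons_of_ne_nil (pvPieces_ne_nil cs [c])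
      simp only [pvPieces, hc, if_pos, List.map_cons]
      rw [hq, List.map_cons, PySem.Chars.join_cons_cons, ← List.map_cons, ← hq, ih [c]]
      simp [pvEmit, hc, PySem.Chars.lower, PySem.Chars.lowerChar]
      all_goals decide
    · simp only [pvPieces, hc, if_neg, Bool.false_eq_true, not_false_eq_true]
      rw [ih (w ++ [c])]
      simp [pvEmit, hc, PySem.Chars.lower]

-- ===== VERDICT (by name: the statement is the Claim_ definition above) =====
theorem extract_property_name_from_uri_spec : Claim_equal_extract_property_name_from_uri := by
  intro s _
  unfold Spec_extract_property_name_from_uri extract_property_name_from_uri extract_property_name_from_uri_alt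
  set T := (PySem.Chars.splitOn ((PySem.Chars.splitOn s.toList ['#']).getLastD []) ['/']).getLastD [] with hT
  have h := pv_foldA T T 0 0 [] (by simp) (Nat.le_refl 0)
  simp only [Nat.cast_zero] at h
  dsimp only
  rw [h]
  simp only [Nat.sub_self, List.drop_zero, List.take_zero, List.nil_append] at h ⊢
  rw [pv_join_pieces T []]
  have hE : pvEmit = fun c => if PySem.Chars.isupper c then [' ', c] else [c] := rfl
  rw [hE]
  simp [PySem.Chars.lower]
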